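-- pv_equiv track=rewrite | github.com/wlkaqw/python | 24年python考试7、8题.py | fun08
-- ===== SOURCE A (Python) =====
-- def IsReplace(lst1, lst2):
--     flag = 0
--     for i in range(len(lst1)):
--         if lst2[i] < lst1[i]:
--             break
--         if lst2[i] > lst1[i]:
--             flag = 1
--     else:
--         if flag == 1:
--             return True
--     return False
--
-- def fun08(lst):
--     res = []
--     for a in lst:
--         for b in lst:
--             if a is not b:
--                 if IsReplace(a, b):
--                     break
--         else:
--             res.append(a)
--     return res
-- ===== SOURCE B (Python) =====
-- def dominates(p, q):
--     # q strictly dominates p on p's coordinates (q at least as long)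
--     return len(p) <= len(q) and all(y >= x for x, y in zip(p, q)) and any(y > x for x, y in zip(p, q))
--
-- def fun08(lst):
--     res = []
--     for p in lst:
--         if any(dominates(p, r) for r in res):
--             continue
--         res = [r for r in res if not dominates(r, p)]
--         res.append(p)
--     return res
-- ===== Notes on version B (the rewrite author's own statement) =====
-- stated objective: alternative
-- what changed: Instead of re-scanning the whole list for a dominator of every element (nested loops), B maintains a live list of current maxima: each point is skipped if a current maximum strictly dominates it, otherwise it prunes the maxima it dominates and joins them.
-- outside the precondition, e.g. on fun08([[5, 5], [10, 10], [9]]): A returns [[10, 10]], B returns [[10, 10]]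
import Mathlib
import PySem

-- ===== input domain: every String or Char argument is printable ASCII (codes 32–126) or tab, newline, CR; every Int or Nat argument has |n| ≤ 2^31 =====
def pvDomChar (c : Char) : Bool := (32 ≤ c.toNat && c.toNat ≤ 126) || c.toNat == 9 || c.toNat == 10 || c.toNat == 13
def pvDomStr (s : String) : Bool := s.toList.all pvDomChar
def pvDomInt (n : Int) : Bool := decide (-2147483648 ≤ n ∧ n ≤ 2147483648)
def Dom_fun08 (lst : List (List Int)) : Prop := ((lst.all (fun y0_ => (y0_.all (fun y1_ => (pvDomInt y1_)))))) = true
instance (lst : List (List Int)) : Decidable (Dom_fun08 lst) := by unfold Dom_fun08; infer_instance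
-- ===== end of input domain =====

-- B maintains a live list of current maxima (skip a dominated point, prune the maxima a new
-- point dominates) instead of A's full rescan of the whole list for every element.

-- ===== PORT A =====
-- IsReplace: loop over i in range(len lst1) with flag, breaking on lst2[i] < lst1[i];
-- rendered as simultaneous structural recursion over the two lists (same steps, same order).
-- The `(_ :: _, [])` case is Python's IndexError (excluded by Pre_fun08 below).
def isReplaceA : List Int → List Int → Bool → Bool
  | [], _, flag => flag                      -- for-else reached: True iff flag was set
  | _ :: _, [], _ => false                   -- IndexError in Python; unreached inside Pre_
  | x :: xs, y :: ys, flag =>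
      if y < x then false                    -- break → return False
      else isReplaceA xs ys (flag || decide (x < y))

-- `a is not b` is ported as value inequality: for equal values IsReplace returns False and
-- raises nothing, so object identity and value equality give the same behaviour.
def fun08 (lst : List (List Int)) : List (List Int) :=
  lst.foldl
    (fun res a =>
      if lst.any (fun b => decide (a ≠ b) && isReplaceA a b false) then res
      else res ++ [a])
    []

-- ===== PORT B =====
def dominatesB (p q : List Int) : Bool :=
  decide (p.length ≤ q.length)
    && (p.zip q).all (fun pr => decide (pr.1 ≤ pr.2))
    && (p.zip q).any (fun pr => decide (pr.1 < pr.2))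

def fun08_alt (lst : List (List Int)) : List (List Int) :=
  lst.foldl
    (fun res p =>
      if res.any (fun r => dominatesB p r) then res
      else (res.filter fun r => ! dominatesB r p) ++ [p])
    []

-- ===== PRECONDITION & SPEC =====
-- Pre_ excludes inputs containing a pair (a,b) with b shorter than a and b pointwise ≥ a on
-- their common prefix: on such pairs IsReplace(a,b) raises IndexError, so A raises on most of
-- these inputs (on a few A still returns because an earlier dominator breaks the scan first).
def Pre_fun08 (lst : List (List Int)) : Prop :=
  ∀ a ∈ lst, ∀ b ∈ lst, b.length < a.length → ∃ pr ∈ a.zip b, pr.2 < pr.1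
instance (lst : List (List Int)) : Decidable (Pre_fun08 lst) := by unfold Pre_fun08; infer_instance

def pvWitness_fun08 : List (List Int) := [[1, 2], [2, 3], [0, 0]]

def Spec_fun08 (lst : List (List Int)) (out : List (List Int)) : Prop := out = fun08_alt lst
instance (lst : List (List Int)) (out : List (List Int)) : Decidable (Spec_fun08 lst out) := by unfold Spec_fun08; infer_instance

-- ===== CLAIM (what is proved, stated in full; the proofs are below) =====
def Claim_equal_fun08 : Prop := ∀ (lst : List (List Int)), Dom_fun08 lst → Pre_fun08 lst → Spec_fun08 lst (fun08 lst)

-- ===== LEMMAS AND PROOFS =====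

-- the pairwise condition Pre_fun08 imposes on every pair of elements
def pairOK (a b : List Int) : Prop := b.length < a.length → ∃ pr ∈ a.zip b, pr.2 < pr.1

-- characterisation of A's IsReplace loop
theorem isReplaceA_eq (p : List Int) : ∀ (q : List Int), pairOK p q → ∀ (flag : Bool),
    isReplaceA p q flag
      = ((p.zip q).all (fun pr => decide (pr.1 ≤ pr.2))
          && (flag || (p.zip q).any (fun pr => decide (pr.1 < pr.2)))) := by
  induction p with
  | nil => intro q h flag; simp [isReplaceA]
  | cons x xs ih =>
    intro q h flag
    match q with
    | [] =>
      exfalso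
      obtain ⟨pr, hpr, _⟩ := h (by simp)
      simp at hpr
    | y :: ys =>
      by_cases hyx : y < x
      · simp [isReplaceA, hyx]
      · have hok : pairOK xs ys := by
          intro hlen
          obtain ⟨pr, hpr, hlt⟩ := h (by simpa using hlen)
          simp at hpr
          rcases hpr with ⟨hx, hy⟩ | hmem
          · exfalso; omega
          · exact ⟨pr, hmem, hlt⟩
        simp only [isReplaceA, if_neg hyx]
        rw [ih ys hok]
        simp [List.zip]
        have hxy : decide (x ≤ y) = true := by simp; omega
        rw [hxy]
        cases flag <;> simp

-- index-wise reading of the componentwise tests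
theorem zip_all_le (p q : List Int) :
    ((p.zip q).all (fun pr => decide (pr.1 ≤ pr.2)) = true)
      ↔ ∀ (i : Nat) (h1 : i < p.length) (h2 : i < q.length), p[i] ≤ q[i] := by
  rw [List.all_eq_true]
  constructor
  · intro h i h1 h2
    have := h (p[i], q[i]) (by
      rw [List.mem_iff_getElem]
      exact ⟨i, by simp [List.length_zip]; omega, by simp [List.getElem_zip]⟩)
    simpa using this
  · intro h pr hpr
    rw [List.mem_iff_getElem] at hpr
    obtain ⟨i, hi, hget⟩ := hpr
    simp [List.length_zip] at hi
    rw [List.getElem_zip] at hget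
    subst hget
    simpa using h i (by omega) (by omega)

theorem zip_any_lt (p q : List Int) :
    ((p.zip q).any (fun pr => decide (pr.1 < pr.2)) = true)
      ↔ ∃ (i : Nat) (h1 : i < p.length) (h2 : i < q.length), p[i] < q[i] := by
  rw [List.any_eq_true]
  constructor
  · intro ⟨pr, hpr, hlt⟩
    rw [List.mem_iff_getElem] at hpr
    obtain ⟨i, hi, hget⟩ := hpr
    simp [List.length_zip] at hi
    rw [List.getElem_zip] at hget
    subst hget
    exact ⟨i, by omega, by omega, by simpa using hlt⟩
  · intro ⟨i, h1, h2, hlt⟩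
    refine ⟨(p[i], q[i]), ?_, by simpa using hlt⟩
    rw [List.mem_iff_getElem]
    exact ⟨i, by simp [List.length_zip]; omega, by simp [List.getElem_zip]⟩

-- strict dominance is a strict partial order
theorem dominatesB_irrefl (a : List Int) : dominatesB a a = false := by
  unfold dominatesB
  simp only [Bool.and_eq_false_iff]
  right
  rw [Bool.eq_false_iff]
  intro h
  obtain ⟨i, h1, h2, hlt⟩ := (zip_any_lt a a).mp h
  omega

theorem dominatesB_trans (a b c : List Int) (hab : dominatesB a b = true)
    (hbc : dominatesB b c = true) : dominatesB a c = true := by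
  unfold dominatesB at *
  simp only [Bool.and_eq_true, decide_eq_true_eq] at hab hbc
  obtain ⟨⟨hlab, allab⟩, anyab⟩ := hab
  obtain ⟨⟨hlbc, allbc⟩, anybc⟩ := hbc
  rw [zip_all_le] at allab allbc
  obtain ⟨i, h1, h2, hlt⟩ := (zip_any_lt a b).mp anyab
  simp only [Bool.and_eq_true, decide_eq_true_eq]
  refine ⟨⟨by omega, ?_⟩, ?_⟩
  · rw [zip_all_le]
    intro j j1 j2
    have := allab j j1 (by omega)
    have := allbc j (by omega) (by omega)
    omega
  · rw [zip_any_lt]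
    exact ⟨i, h1, by omega, by have := allbc i (by omega) (by omega); omega⟩

-- under pairOK, A's dominance test equals B's
theorem isReplaceA_eq_dominatesB (p q : List Int) (h : pairOK p q) :
    isReplaceA p q false = dominatesB p q := by
  rw [isReplaceA_eq p q h false]
  unfold dominatesB
  by_cases hl : p.length ≤ q.length
  · simp [hl]
  · obtain ⟨pr, hpr, hlt⟩ := h (by omega)
    have : (p.zip q).all (fun pr => decide (pr.1 ≤ pr.2)) = false := by
      rw [Bool.eq_false_iff]
      intro hall
      rw [List.all_eq_true] at hall
      have := hall pr hpr
      simp at this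
      omega
    simp [this, hl]

-- the common normal form: keep exactly the elements no element of l dominates
def skyl (l : List (List Int)) : List (List Int) :=
  l.filter (fun a => ! l.any (fun b => dominatesB a b))

theorem foldl_appendIf_congr {α : Type} (l : List α) :
    ∀ (acc : List α) (f g : α → Bool), (∀ a ∈ l, f a = g a) →
    l.foldl (fun res a => if f a then res else res ++ [a]) acc
      = acc ++ l.filter (fun a => ! g a) := by
  induction l with
  | nil => intro acc f g h; simp
  | cons x xs ih =>
    intro acc f g h
    have hx := h x (by simp)
    simp only [List.foldl_cons]
    rw [ih _ f g (fun a ha => h a (by simp [ha]))]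
    by_cases hfx : f x = true
    · rw [if_pos hfx, List.filter_cons, if_neg (by simp [← hx, hfx])]
    · rw [if_neg hfx, List.filter_cons, if_pos (by simp [← hx]; simpa using hfx)]
      simp

theorem any_congr_mem {α : Type} (l : List α) (f g : α → Bool) (h : ∀ a ∈ l, f a = g a) :
    l.any f = l.any g := by
  induction l with
  | nil => rfl
  | cons x xs ih =>
    simp only [List.any_cons]
    rw [h x (by simp), ih (fun a ha => h a (by simp [ha]))]

-- A computes the skyline via full rescans
theorem fun08_eq_skyl (lst : List (List Int)) (h : Pre_fun08 lst) : fun08 lst = skyl lst := by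
  unfold fun08
  rw [foldl_appendIf_congr lst []
      (fun a => lst.any (fun b => decide (a ≠ b) && isReplaceA a b false))
      (fun a => lst.any (fun b => dominatesB a b)) ?_]
  · rfl
  · intro a ha
    apply any_congr_mem
    intro b hb
    by_cases hab : a = b
    · subst hab
      simp [dominatesB_irrefl]
    · rw [decide_eq_true (by exact hab), Bool.true_and]
      exact isReplaceA_eq_dominatesB a b (h a ha b hb)

theorem countP_lt {α : Type} (l : List α) (p q : α → Bool) (c : α) (hc : c ∈ l)
    (hq : q c = true) (hp : p c = false) (himp : ∀ x, p x = true → q x = true) :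
    l.countP p < l.countP q := by
  obtain ⟨s, t, rfl⟩ := List.append_of_mem hc
  rw [List.countP_append, List.countP_append, List.countP_cons, List.countP_cons]
  have h1 : s.countP p ≤ s.countP q := List.countP_mono_left (fun x _ => himp x)
  have h2 : t.countP p ≤ t.countP q := List.countP_mono_left (fun x _ => himp x)
  simp [hp, hq]
  omega

-- above any dominated element there is an undominated element dominating it
theorem exists_undominated_aux (n : Nat) (l : List (List Int)) (p : List Int) :
    ∀ b, (l.filter (fun c => dominatesB b c)).length ≤ n → b ∈ l → dominatesB p b = true →
    ∃ r, r ∈ l ∧ dominatesB p r = true ∧ l.any (fun c => dominatesB r c) = false := by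
  induction n with
  | zero =>
    intro b hn hb hd
    refine ⟨b, hb, hd, ?_⟩
    rw [Bool.eq_false_iff]
    intro hany
    rw [List.any_eq_true] at hany
    obtain ⟨c, hc, hbc⟩ := hany
    have : c ∈ l.filter (fun c => dominatesB b c) := by rw [List.mem_filter]; exact ⟨hc, hbc⟩
    have := List.length_pos_of_mem this
    omega
  | succ n ih =>
    intro b hn hb hd
    by_cases hany : l.any (fun c => dominatesB b c) = true
    · rw [List.any_eq_true] at hany
      obtain ⟨c, hc, hbc⟩ := hany
      have hlt : (l.filter (fun d => dominatesB c d)).length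
          < (l.filter (fun d => dominatesB b d)).length := by
        rw [← List.countP_eq_length_filter, ← List.countP_eq_length_filter]
        exact countP_lt l _ _ c hc hbc (dominatesB_irrefl c)
          (fun x hx => dominatesB_trans b c x hbc hx)
      exact ih c (by omega) hc (dominatesB_trans p b c hd hbc)
    · exact ⟨b, hb, hd, by simpa using hany⟩

theorem exists_undominated (l : List (List Int)) (p b : List Int) (hb : b ∈ l)
    (hd : dominatesB p b = true) :
    ∃ r, r ∈ l ∧ dominatesB p r = true ∧ l.any (fun c => dominatesB r c) = false := by
  exact exists_undominated_aux (l.filter (fun c => dominatesB b c)).length l p b le_rfl hb hd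

-- B's incremental maintenance also computes the skyline (this needs no precondition)
theorem fun08_alt_eq_skyl (lst : List (List Int)) : fun08_alt lst = skyl lst := by
  unfold fun08_alt
  induction lst using List.reverseRecOn with
  | nil => rfl
  | append_singleton l p ih =>
    rw [List.foldl_append, List.foldl_cons, List.foldl_nil, ih]
    conv_rhs => unfold skyl
    rw [List.filter_append]
    by_cases hp : (skyl l).any (fun r => dominatesB p r) = true
    · rw [if_pos hp]
      rw [List.any_eq_true] at hp
      obtain ⟨r, hr, hpr⟩ := hp
      unfold skyl at hr
      rw [List.mem_filter] at hr
      obtain ⟨hrl, _⟩ := hr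
      have hanyp : l.any (fun b => dominatesB p b) = true :=
        List.any_eq_true.mpr ⟨r, hrl, hpr⟩
      have h1 : List.filter (fun a => ! (l ++ [p]).any (fun b => dominatesB a b)) [p] = [] := by
        simp only [List.filter_cons, List.filter_nil]
        rw [if_neg]
        simp [List.any_append, hanyp]
      have h2 : l.filter (fun a => ! (l ++ [p]).any (fun b => dominatesB a b))
          = l.filter (fun a => ! l.any (fun b => dominatesB a b)) := by
        apply List.filter_congr
        intro a ha
        simp only [List.any_append, List.any_cons, List.any_nil, Bool.or_false]
        by_cases haa : l.any (fun b => dominatesB a b) = true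
        · simp [haa]
        · have hap : dominatesB a p = false := by
            rw [Bool.eq_false_iff]
            intro hap
            exact haa (List.any_eq_true.mpr ⟨r, hrl, dominatesB_trans a p r hap hpr⟩)
          simp [haa, hap]
      rw [h1, h2, List.append_nil]
      rfl
    · rw [if_neg hp]
      have hanyp : l.any (fun b => dominatesB p b) = false := by
        rw [Bool.eq_false_iff]
        intro hany
        rw [List.any_eq_true] at hany
        obtain ⟨b, hb, hpb⟩ := hany
        obtain ⟨r, hrl, hpr, hrmax⟩ := exists_undominated l p b hb hpb
        apply hp
        rw [List.any_eq_true]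
        refine ⟨r, ?_, hpr⟩
        unfold skyl
        rw [List.mem_filter]
        exact ⟨hrl, by simp [hrmax]⟩
      have h1 : List.filter (fun a => ! (l ++ [p]).any (fun b => dominatesB a b)) [p] = [p] := by
        simp only [List.filter_cons, List.filter_nil]
        rw [if_pos]
        simp [List.any_append, hanyp, dominatesB_irrefl]
      have h2 : l.filter (fun a => ! (l ++ [p]).any (fun b => dominatesB a b))
          = (skyl l).filter (fun r => ! dominatesB r p) := by
        unfold skyl
        rw [List.filter_filter]
        apply List.filter_congr
        intro a ha
        simp only [List.any_append, List.any_cons, List.any_nil, Bool.or_false]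
        cases h3 : l.any (fun b => dominatesB a b) <;> cases h4 : dominatesB a p <;> simp
      rw [h1, h2]

-- ===== VERDICT (by name: the statement is the Claim_ definition above) =====
theorem fun08_spec : Claim_equal_fun08 := by
  intro lst _ hpre
  unfold Spec_fun08
  rw [fun08_eq_skyl lst hpre, fun08_alt_eq_skyl]
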